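-- pv_equiv track=rewrite | github.com/NguyenHoanKhanh/GPU | ProcessingUnit/processing/include/instr_converter.py | parse_mask
-- ===== SOURCE A (Python) =====
-- swizzle_map = {"x": "00", "y": "01", "z": "10", "w": "11"}
--
-- def parse_mask(mask_str):
--     if not mask_str.startswith("."):
--         return "1111"
--     mask = mask_str[1:]
--     if not mask or len(mask) > 4 or not all(c in swizzle_map for c in mask):
--         raise ValueError(f"Invalid mask pattern: {mask}")
--     result = ["0"] * 4
--     for c in mask:
--         if c == "x":
--             result[0] = "1"
--         elif c == "y":
--             result[1] = "1"
--         elif c == "z":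
--             result[2] = "1"
--         elif c == "w":
--             result[3] = "1"
--     return "".join(result)
-- ===== SOURCE B (Python) =====
-- swizzle_map = {"x": "00", "y": "01", "z": "10", "w": "11"}
--
-- def parse_mask(mask_str):
--     if not mask_str.startswith("."):
--         return "1111"
--     mask = mask_str[1:]
--     if not mask or len(mask) > 4 or not all(c in swizzle_map for c in mask):
--         raise ValueError(f"Invalid mask pattern: {mask}")
--     return "".join("1" if c in mask else "0" for c in "xyzw")
-- ===== Notes on version B (the rewrite author's own statement) =====
-- stated objective: simpler
-- what changed: B iterates the four canonical axes in order and emits each output bit by testing membership of the axis in the mask, instead of A's scan over the mask writing into a mutable four-slot buffer via an if/elif chain.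
import Mathlib
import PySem

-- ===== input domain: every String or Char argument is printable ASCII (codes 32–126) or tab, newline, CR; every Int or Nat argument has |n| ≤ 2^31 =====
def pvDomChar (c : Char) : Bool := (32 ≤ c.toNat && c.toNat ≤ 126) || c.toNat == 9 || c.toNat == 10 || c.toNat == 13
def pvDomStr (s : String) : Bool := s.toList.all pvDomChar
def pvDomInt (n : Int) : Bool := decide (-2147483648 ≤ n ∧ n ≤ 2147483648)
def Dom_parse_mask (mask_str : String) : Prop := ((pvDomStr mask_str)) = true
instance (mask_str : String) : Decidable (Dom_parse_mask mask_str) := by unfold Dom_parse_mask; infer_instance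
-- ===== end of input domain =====

-- B changes the decomposition: it builds each output bit by membership of the axis in the mask
-- instead of writing into a 4-slot buffer while scanning the mask; equivalence is about the
-- return value (on the stated Pre_, where Python A does not raise).

-- ===== PORT A =====
-- swizzle_map keys, used only for validity ('c in swizzle_map')
def pvSwizzleKeys : List Char := ['x', 'y', 'z', 'w']

-- the for-loop of A: writes '1' into the matching slot of the 4-slot buffer
def pvAStep (r : Char × Char × Char × Char) (c : Char) : Char × Char × Char × Char :=
  if c = 'x' then ('1', r.2.1, r.2.2.1, r.2.2.2)
  else if c = 'y' then (r.1, '1', r.2.2.1, r.2.2.2)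
  else if c = 'z' then (r.1, r.2.1, '1', r.2.2.2)
  else if c = 'w' then (r.1, r.2.1, r.2.2.1, '1')
  else r

def parse_mask (mask_str : String) : String :=
  if ¬ PySem.Str.startswith mask_str "." then "1111"
  else
    let mask := mask_str.toList.drop 1   -- mask_str[1:]
    if mask = [] ∨ mask.length > 4 ∨ ¬ mask.all (fun c => c ∈ pvSwizzleKeys) then
      ""  -- Python raises ValueError here; excluded by Pre_parse_mask
    else
      let r := mask.foldl pvAStep ('0', '0', '0', '0')
      String.ofList [r.1, r.2.1, r.2.2.1, r.2.2.2]

-- ===== PORT B =====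
def parse_mask_alt (mask_str : String) : String :=
  if ¬ PySem.Str.startswith mask_str "." then "1111"
  else
    let mask := mask_str.toList.drop 1   -- mask_str[1:]
    if mask = [] ∨ mask.length > 4 ∨ ¬ mask.all (fun c => c ∈ pvSwizzleKeys) then
      ""  -- Python raises ValueError here; excluded by Pre_parse_mask
    else
      String.ofList (['x', 'y', 'z', 'w'].map (fun c => if c ∈ mask then '1' else '0'))

-- ===== PRECONDITION & SPEC =====
-- Pre_ excludes exactly the inputs on which Python A raises ValueError: a string starting
-- with a dot whose tail is empty, longer than 4, or contains a non-axis character.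
def Pre_parse_mask (mask_str : String) : Prop :=
  PySem.Str.startswith mask_str "." →
    (mask_str.toList.drop 1 ≠ [] ∧ (mask_str.toList.drop 1).length ≤ 4 ∧
      (mask_str.toList.drop 1).all (fun c => c ∈ pvSwizzleKeys) = true)
instance (mask_str : String) : Decidable (Pre_parse_mask mask_str) := by
  unfold Pre_parse_mask; infer_instance

def pvWitness_parse_mask : String := ".yx"

def Spec_parse_mask (mask_str : String) (out : String) : Prop := out = parse_mask_alt mask_str
instance (mask_str : String) (out : String) : Decidable (Spec_parse_mask mask_str out) := by
  unfold Spec_parse_mask; infer_instance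

-- ===== CLAIM (what is proved, stated in full; the proofs are below) =====
def Claim_equal_parse_mask : Prop := ∀ (mask_str : String), Dom_parse_mask mask_str → Pre_parse_mask mask_str → Spec_parse_mask mask_str (parse_mask mask_str)

-- ===== LEMMAS AND PROOFS =====
-- A's buffer loop, characterised: each slot ends '1' iff its axis occurs in the scanned list.
lemma pvAStep_foldl (l : List Char) (r0 r1 r2 r3 : Char) :
    l.foldl pvAStep (r0, r1, r2, r3) =
      ((if 'x' ∈ l then '1' else r0), (if 'y' ∈ l then '1' else r1),
       (if 'z' ∈ l then '1' else r2), (if 'w' ∈ l then '1' else r3)) := by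
  induction l generalizing r0 r1 r2 r3 with
  | nil => simp
  | cons c t ih =>
    simp only [List.foldl_cons, pvAStep, List.mem_cons]
    by_cases hx : c = 'x' <;> by_cases hy : c = 'y' <;> by_cases hz : c = 'z'
      <;> by_cases hw : c = 'w' <;> simp_all [eq_comm]

-- ===== VERDICT (by name: the statement is the Claim_ definition above) =====
theorem parse_mask_spec : Claim_equal_parse_mask := by
  intro s _ _
  unfold Spec_parse_mask parse_mask parse_mask_alt
  by_cases hs : PySem.Str.startswith s "." = true
  · simp only [hs, not_true_eq_false, if_false]
    split
    · rfl
    · simp [pvAStep_foldl]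
  · have h : PySem.Chars.startswith s.toList ['.'] = false := by
      simpa [PySem.Str.startswith] using hs
    simp [h]
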